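-- pv_equiv track=rewrite | github.com/posl/comment_recommendation | script/split_gen/2_time/zh/111_D/6.py | check
-- ===== SOURCE A (Python) =====
-- def check(l):
--     if len(l) % 2 != 0:
--         return False
--     if len(l) == 2:
--         return False
--     if len(l) == 4:
--         if l[0] == l[2] and l[1] == l[3] and l[0] != l[1]:
--             return True
--         else:
--             return False
--     if len(l) > 4:
--         if l[0] == l[2] and l[1] == l[3] and l[0] != l[1]:
--             return check(l[2:])
--         else:
--             return False
-- ===== SOURCE B (Python) =====
-- def check(l):
--     if len(l) % 2 != 0:
--         return False
--     if len(l) == 2: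
--         return False
--     if len(l) >= 4:
--         return l == l[:2] * (len(l) // 2) and l[0] != l[1]
-- ===== Notes on version B (the rewrite author's own statement) =====
-- stated objective: idiomatic
-- what changed: Replaces the recursive pairwise slice-and-recurse scan with a single closed-form comparison: build the expected repetition l[:2]*(len(l)//2) and compare it with l in one shot.
import Mathlib
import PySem

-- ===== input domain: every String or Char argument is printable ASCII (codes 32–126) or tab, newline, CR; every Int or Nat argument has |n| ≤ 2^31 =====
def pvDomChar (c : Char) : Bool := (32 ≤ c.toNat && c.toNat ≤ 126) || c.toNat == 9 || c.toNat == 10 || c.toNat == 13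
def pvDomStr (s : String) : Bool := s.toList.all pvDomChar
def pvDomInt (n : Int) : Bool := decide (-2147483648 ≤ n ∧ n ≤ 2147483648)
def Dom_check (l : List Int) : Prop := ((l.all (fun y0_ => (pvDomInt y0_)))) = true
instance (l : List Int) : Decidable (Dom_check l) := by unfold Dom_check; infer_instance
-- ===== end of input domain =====

-- B replaces A's slice-and-recurse pairwise scan by one closed-form comparison with the
-- built reference list l[:2] * (len(l)//2)  (objective: idiomatic / single pass).

-- ===== PORT A =====
def check (l : List Int) : Option Bool :=
  if l.length % 2 ≠ 0 then some false
  else if l.length = 2 then some false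
  else if l.length = 4 then
    if PySem.List.pyGet? l 0 = PySem.List.pyGet? l 2 ∧ PySem.List.pyGet? l 1 = PySem.List.pyGet? l 3
        ∧ PySem.List.pyGet? l 0 ≠ PySem.List.pyGet? l 1
    then some true else some false
  else if l.length > 4 then
    if PySem.List.pyGet? l 0 = PySem.List.pyGet? l 2 ∧ PySem.List.pyGet? l 1 = PySem.List.pyGet? l 3
        ∧ PySem.List.pyGet? l 0 ≠ PySem.List.pyGet? l 1
    then check (PySem.List.slice l (some 2) none)
    else some false
  else none
termination_by l.length
decreasing_by
  simp [PySem.List.slice_from]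
  omega

-- ===== PORT B =====
def check_alt (l : List Int) : Option Bool :=
  if l.length % 2 ≠ 0 then some false
  else if l.length = 2 then some false
  else if l.length ≥ 4 then
    some (decide (l = (List.replicate (l.length / 2) (l.take 2)).flatten)
          && decide (PySem.List.pyGet? l 0 ≠ PySem.List.pyGet? l 1))
  else none

-- ===== PRECONDITION & SPEC =====
def Spec_check (l : List Int) (out : Option Bool) : Prop := out = check_alt l
instance (l : List Int) (out : Option Bool) : Decidable (Spec_check l out) := by unfold Spec_check; infer_instance

-- ===== CLAIM (what is proved, stated in full; the proofs are below) =====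
def Claim_equal_check : Prop := ∀ (l : List Int), Dom_check l → Spec_check l (check l)

-- ===== LEMMAS AND PROOFS =====

theorem pg0 (xs : List Int) : PySem.List.pyGet? xs 0 = xs[0]? := by
  rw [show (0:Int) = ((0:Nat):Int) from rfl, PySem.List.pyGet?_natCast]
theorem pg1 (xs : List Int) : PySem.List.pyGet? xs 1 = xs[1]? := by
  rw [show (1:Int) = ((1:Nat):Int) from rfl, PySem.List.pyGet?_natCast]
theorem pg2 (xs : List Int) : PySem.List.pyGet? xs 2 = xs[2]? := by
  rw [show (2:Int) = ((2:Nat):Int) from rfl, PySem.List.pyGet?_natCast]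
theorem pg3 (xs : List Int) : PySem.List.pyGet? xs 3 = xs[3]? := by
  rw [show (3:Int) = ((3:Nat):Int) from rfl, PySem.List.pyGet?_natCast]

theorem flatten_replicate_pair (n : Nat) (a b : Int) :
    (List.replicate (n + 1) [a, b]).flatten = a :: b :: (List.replicate n [a, b]).flatten := by
  simp [List.replicate_succ]

theorem rep_iff (a b c d : Int) (t : List Int) (n : Nat) :
    (a :: b :: c :: d :: t = (List.replicate (n + 2) [a, b]).flatten) ↔
      (c = a ∧ d = b ∧ c :: d :: t = (List.replicate (n + 1) [c, d]).flatten) := by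
  rw [flatten_replicate_pair]
  constructor
  · intro h
    injection h with _ h
    injection h with _ h
    have h2 := h
    rw [flatten_replicate_pair] at h2
    injection h2 with hca h2
    injection h2 with hdb _
    exact ⟨hca, hdb, by rw [hca, hdb] at h ⊢; exact h⟩
  · rintro ⟨hca, hdb, hh⟩
    subst hca; subst hdb
    rw [← hh]

theorem check_eq_alt (l : List Int) : check l = check_alt l := by
  induction l using check.induct with
  | case1 l h => rw [check, check_alt]; simp [h]
  | case2 l h h2 => rw [check, check_alt]; simp [h, h2]
  | case3 l h h2 h4 hc =>
      clear hc
      match l, h4 with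
      | [a, b, c, d], _ =>
        rw [check, check_alt]
        norm_num [List.replicate_succ, pg0, pg1, pg2, pg3]
        by_cases h1 : a = c <;> by_cases h2' : b = d <;> by_cases h3 : a = b <;>
          simp_all <;> tauto
  | case4 l h h2 h4 hc =>
      clear hc
      match l, h4 with
      | [a, b, c, d], _ =>
        rw [check, check_alt]
        norm_num [List.replicate_succ, pg0, pg1, pg2, pg3]
        by_cases h1 : a = c <;> by_cases h2' : b = d <;> by_cases h3 : a = b <;>
          simp_all <;> tauto
  | case5 l h h2 h4 h5 hc ih =>
      rw [check, check_alt]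
      match l, h5 with
      | a :: b :: c :: d :: e :: rest, _ =>
        simp only [pg0, pg1, pg2, pg3] at hc
        simp at hc
        obtain ⟨hca, hdb, hab⟩ := hc
        subst hca; subst hdb
        have hcond : PySem.List.pyGet? (a::b::a::b::e::rest) 0 = PySem.List.pyGet? (a::b::a::b::e::rest) 2 ∧
            PySem.List.pyGet? (a::b::a::b::e::rest) 1 = PySem.List.pyGet? (a::b::a::b::e::rest) 3 ∧
            PySem.List.pyGet? (a::b::a::b::e::rest) 0 ≠ PySem.List.pyGet? (a::b::a::b::e::rest) 1 := by
          simp [pg0, pg1, pg2, pg3]; exact hab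
        rw [if_neg h, if_neg h2, if_neg h4, if_pos (by simpa using h5), if_pos hcond, ih]
        have hsl : PySem.List.slice (a::b::a::b::e::rest) (some 2) none = a::b::e::rest := by
          rw [show ((2:Int)) = ((2:Nat):Int) from rfl, PySem.List.slice_from_natCast]
          rfl
        rw [hsl, check_alt]
        have hodd : rest.length % 2 = 1 := by simp at h; omega
        have hnot1 : ¬ (a::b::e::rest : List Int).length % 2 ≠ 0 := by simp; omega
        have hnot2 : ¬ (a::b::e::rest : List Int).length = 2 := by simp
        have hge4 : (a::b::e::rest : List Int).length ≥ 4 := by simp; omega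
        have hge4' : (a::b::a::b::e::rest : List Int).length ≥ 4 := by simp
        rw [if_neg hnot1, if_neg hnot2, if_pos hge4, if_neg h, if_neg h2, if_pos hge4']
        congr 1
        obtain ⟨n, hn⟩ : ∃ n, (rest.length + 3) / 2 = n + 1 := ⟨(rest.length + 3) / 2 - 1, by omega⟩
        have hd1 : (a::b::a::b::e::rest : List Int).length / 2 = n + 2 := by simp; omega
        have hd2 : (a::b::e::rest : List Int).length / 2 = n + 1 := by simp; omega
        have hrep : (a::b::a::b::e::rest = (List.replicate ((a::b::a::b::e::rest : List Int).length / 2) (List.take 2 (a::b::a::b::e::rest))).flatten)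
            ↔ (a::b::e::rest = (List.replicate ((a::b::e::rest : List Int).length / 2) (List.take 2 (a::b::e::rest))).flatten) := by
          rw [hd1, hd2, show List.take 2 (a::b::a::b::e::rest) = [a,b] from rfl,
            show List.take 2 (a::b::e::rest) = [a,b] from rfl,
            rep_iff a b a b (e::rest) n]
          tauto
        have hg : (PySem.List.pyGet? (a::b::a::b::e::rest) 0 ≠ PySem.List.pyGet? (a::b::a::b::e::rest) 1)
            ↔ (PySem.List.pyGet? (a::b::e::rest) 0 ≠ PySem.List.pyGet? (a::b::e::rest) 1) := by
          simp [pg0, pg1]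
        rw [decide_eq_decide.mpr hrep, decide_eq_decide.mpr hg]
  | case6 l h h2 h4 h5 hc =>
      rw [check, check_alt]
      match l, h5 with
      | a :: b :: c :: d :: e :: rest, _ =>
        rw [if_neg h, if_neg h2, if_neg h4, if_pos (by simpa using h5), if_neg hc,
          if_pos (show (a::b::c::d::e::rest : List Int).length ≥ 4 by simp)]
        simp only [pg0, pg1, pg2, pg3] at hc
        simp at hc
        have hfalse : ¬ (a::b::c::d::e::rest = (List.replicate ((a::b::c::d::e::rest : List Int).length / 2) (List.take 2 (a::b::c::d::e::rest))).flatten ∧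
            PySem.List.pyGet? (a::b::c::d::e::rest) 0 ≠ PySem.List.pyGet? (a::b::c::d::e::rest) 1) := by
          rintro ⟨h1, hne⟩
          simp [pg0, pg1] at hne
          obtain ⟨n, hn⟩ : ∃ n, (a::b::c::d::e::rest : List Int).length / 2 = n + 2 := by
            refine ⟨(a::b::c::d::e::rest : List Int).length / 2 - 2, ?_⟩
            simp at h ⊢; omega
          rw [hn, show List.take 2 (a::b::c::d::e::rest) = [a,b] from rfl, rep_iff] at h1
          exact hne (hc h1.1.symm h1.2.1.symm)
        have hb : (decide (a::b::c::d::e::rest = (List.replicate ((a::b::c::d::e::rest : List Int).length / 2) (List.take 2 (a::b::c::d::e::rest))).flatten) &&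
            decide (PySem.List.pyGet? (a::b::c::d::e::rest) 0 ≠ PySem.List.pyGet? (a::b::c::d::e::rest) 1)) = false := by
          by_cases hP : a::b::c::d::e::rest = (List.replicate ((a::b::c::d::e::rest : List Int).length / 2) (List.take 2 (a::b::c::d::e::rest))).flatten
          · by_cases hQ : PySem.List.pyGet? (a::b::c::d::e::rest) 0 ≠ PySem.List.pyGet? (a::b::c::d::e::rest) 1
            · exact absurd ⟨hP, hQ⟩ hfalse
            · rw [decide_eq_false hQ, Bool.and_false]
          · rw [decide_eq_false hP, Bool.false_and]
        rw [hb]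
        split_ifs <;> rfl
  | case7 l h h2 h4 h5 =>
      rw [check, check_alt]
      have : ¬ l.length ≥ 4 := by omega
      simp [h, h2, h4, h5, this]

-- ===== VERDICT (by name: the statement is the Claim_ definition above) =====
theorem check_spec : Claim_equal_check := by
  intro l _
  unfold Spec_check
  exact check_eq_alt l
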